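-- pv_equiv track=rewrite | github.com/forrestchang/roam-to-git | roam_to_git/formatter.py | _extract_line_with_children
-- ===== SOURCE A (Python) =====
-- from typing import Dict, List, Match, Tuple
--
-- def _extract_line_with_children(text: str, start: int, end: int) -> str:
--     """Return the line containing the match plus one level of children below it."""
--     line_start = text.rfind("\n", 0, start) + 1
--     line_end = text.find("\n", end)
--     if line_end == -1:
--         line_end = len(text)
--
--     current_line = text[line_start:line_end].rstrip()
--     base_indent = len(current_line) - len(current_line.lstrip(" "))
--
--     child_lines: List[str] = []
--     pos = line_end + 1
--     first_child_indent = None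
--     second_child_indent = None
--
--     while pos < len(text):
--         next_end = text.find("\n", pos)
--         if next_end == -1:
--             next_end = len(text)
--         line = text[pos:next_end].rstrip("\n")
--
--         if line.strip() == "":
--             # Preserve blank lines directly under the current block
--             child_lines.append(line)
--             pos = next_end + 1
--             continue
--
--         indent = len(line) - len(line.lstrip(" "))
--         if indent <= base_indent:
--             break
--
--         if first_child_indent is None:
--             first_child_indent = indent
--         elif indent < first_child_indent:
--             break
--
--         if indent > first_child_indent and second_child_indent is None:
--             second_child_indent = indent
--
--         if second_child_indent is not None and indent > second_child_indent:
--             break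
--
--         child_lines.append(line)
--         pos = next_end + 1
--
--     lines = [current_line, *child_lines]
--     if base_indent > 0:
--         lines = [_strip_leading_spaces(l, base_indent) for l in lines]
--
--     block = "\n".join(lines).rstrip("\n")
--     return block
--
-- def _strip_leading_spaces(line: str, count: int) -> str:
--     """Strip up to `count` leading spaces, preserving relative indentation."""
--     if line.strip() == "":
--         return line
--     leading = len(line) - len(line.lstrip(" "))
--     to_remove = min(leading, count)
--     return line[to_remove:]
-- ===== SOURCE B (Python) =====
-- def _strip_leading_spaces(line: str, count: int) -> str:
--     """Strip up to `count` leading spaces, preserving relative indentation."""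
--     if line.strip() == "":
--         return line
--     leading = len(line) - len(line.lstrip(" "))
--     to_remove = min(leading, count)
--     return line[to_remove:]
--
--
-- def _indent(line: str) -> int:
--     return len(line) - len(line.lstrip(" "))
--
--
-- def _deep_scan(rest, first, second):
--     """Accept blanks and lines with first <= indent <= second."""
--     out = []
--     for line in rest:
--         if line.strip() == "":
--             out.append(line)
--             continue
--         ind = _indent(line)
--         if ind < first or ind > second:
--             return out
--         out.append(line)
--     return out
--
--
-- def _level_scan(rest, first):
--     """Accept blanks and lines indented exactly `first`; the first deeper
--     line fixes the second level and hands over to _deep_scan."""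
--     out = []
--     for j, line in enumerate(rest):
--         if line.strip() == "":
--             out.append(line)
--             continue
--         ind = _indent(line)
--         if ind < first:
--             return out
--         if ind == first:
--             out.append(line)
--             continue
--         return out + [line] + _deep_scan(rest[j + 1:], first, ind)
--     return out
--
--
-- def _child_block(following, base):
--     """One level of children: leading blanks, then (if the first non-blank
--     line is deeper than base) that line's level plus at most one deeper level."""
--     i = 0
--     while i < len(following) and following[i].strip() == "":
--         i += 1
--     blanks = following[:i]
--     if i == len(following):
--         return blanks
--     head = following[i]
--     first = _indent(head)
--     if first <= base:
--         return blanks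
--     return blanks + [head] + _level_scan(following[i + 1:], first)
--
--
-- def _extract_line_with_children(text: str, start: int, end: int) -> str:
--     """Return the line containing the match plus one level of children below it."""
--     line_start = text.rfind("\n", 0, start) + 1
--     line_end = text.find("\n", end)
--     if line_end == -1:
--         line_end = len(text)
--
--     current_line = text[line_start:line_end].rstrip()
--     base_indent = _indent(current_line)
--
--     lines = [current_line] + _child_block(text[line_end + 1:].split("\n"), base_indent)
--     if base_indent > 0:
--         lines = [_strip_leading_spaces(l, base_indent) for l in lines]
--     return "\n".join(lines).rstrip("\n")
-- ===== Notes on version B (the rewrite author's own statement) =====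
-- stated objective: alternative
-- what changed: A scans raw character positions with repeated text.find in one stateful while loop carrying two optional indent registers; B pre-splits the tail into a line list and collects the child block with three explicit phases (leading blanks, the first child's level, then a hand-off to a deeper-level scan once the second indent is fixed), with no optional state at all.
import Mathlib
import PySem

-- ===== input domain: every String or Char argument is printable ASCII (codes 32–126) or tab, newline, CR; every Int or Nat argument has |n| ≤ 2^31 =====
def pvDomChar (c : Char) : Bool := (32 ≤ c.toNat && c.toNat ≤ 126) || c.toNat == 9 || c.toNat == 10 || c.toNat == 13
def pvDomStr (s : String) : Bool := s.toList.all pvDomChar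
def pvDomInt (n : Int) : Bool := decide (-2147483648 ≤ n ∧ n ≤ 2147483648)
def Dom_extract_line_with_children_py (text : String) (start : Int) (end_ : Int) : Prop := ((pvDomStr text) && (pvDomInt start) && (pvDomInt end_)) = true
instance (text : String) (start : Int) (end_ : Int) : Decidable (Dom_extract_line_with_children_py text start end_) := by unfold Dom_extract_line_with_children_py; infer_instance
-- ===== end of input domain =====

-- B replaces A's single stateful position-scanning while loop (two optional indent registers)
-- by "pre-split the tail into lines, then collect the child block in three explicit phases:
-- leading blanks, the first child's level, hand-off to a deeper-level scan" (alternative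
-- decomposition, same cost).

-- ===== PORT A =====

-- s.rstrip("\n")  (exact: Python removes trailing characters from the given set, here only '\n')
def pvRstripNl (cs : List Char) : List Char := (cs.reverse.dropWhile (· == '\n')).reverse

-- s.lstrip(" ")  (exact: Python removes leading characters from the given set, here only ' ')
def pvLstripSp (cs : List Char) : List Char := cs.dropWhile (· == ' ')

-- len(line) - len(line.lstrip(" "))
def pvIndentOf (cs : List Char) : Nat := cs.length - (pvLstripSp cs).length

-- _strip_leading_spaces (helper shared verbatim by both Pythons); line[k:] for k ≥ 0 is drop
-- (exact: PySem.List.slice_from)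
def pvStripLeadingSpaces (line : List Char) (count : Nat) : List Char :=
  if PySem.Chars.strip line = [] then line
  else line.drop (min (pvIndentOf line) count)

-- A's while loop over raw positions; fuel = number of remaining characters bounds the
-- iteration count (pos grows by at least 1 per step), it never runs out before pos ≥ len.
-- "first is None / second is None" become `= none` tests; `first.getD 0` / `second'.getD 0`
-- are only read under the `≠ none` guard, exactly like the Python comparisons.
def pvLoopA (cs : List Char) (base : Nat) : Nat → Nat → Option Nat → Option Nat → List (List Char) → List (List Char)
  | 0, _, _, _, acc => acc
  | fuel+1, pos, first, second, acc =>
    if pos < cs.length then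
      let f := PySem.Chars.findFrom cs ['\n'] (pos : Int)
      let nextEnd : Nat := if f = -1 then cs.length else f.toNat
      let line := pvRstripNl ((cs.drop pos).take (nextEnd - pos))   -- text[pos:next_end].rstrip("\n")
      if PySem.Chars.strip line = [] then
        pvLoopA cs base fuel (nextEnd+1) first second (acc ++ [line])
      else
        let indent := pvIndentOf line
        if indent ≤ base then acc
        else if first ≠ none ∧ indent < first.getD 0 then acc      -- elif indent < first: break
        else
          let first' := if first = none then indent else first.getD 0
          let second' := if first' < indent ∧ second = none then some indent else second
          if second' ≠ none ∧ second'.getD 0 < indent then acc    -- break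
          else pvLoopA cs base fuel (nextEnd+1) (some first') second' (acc ++ [line])
    else acc

def extract_line_with_children_py (text : String) (start : Int) (end_ : Int) : String :=
  let cs := text.toList
  -- text.rfind("\n", 0, start) + 1  (rfind ≥ -1, so the sum is ≥ 0 and toNat is exact)
  let line_start : Nat := (PySem.Chars.rfindFrom cs ['\n'] 0 (some start) + 1).toNat
  let f := PySem.Chars.findFrom cs ['\n'] end_
  let line_end : Nat := if f = -1 then cs.length else f.toNat   -- f ≥ 0 when f ≠ -1
  -- text[line_start:line_end]  (both indices ≥ 0: exact by PySem.List.slice_natCast)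
  let current_line := PySem.Chars.rstrip ((cs.drop line_start).take (line_end - line_start))
  let base_indent := pvIndentOf current_line
  let child_lines := pvLoopA cs base_indent cs.length (line_end + 1) none none []
  let lines := current_line :: child_lines
  let lines := if 0 < base_indent then lines.map (pvStripLeadingSpaces · base_indent) else lines
  String.ofList (pvRstripNl (PySem.Chars.join ['\n'] lines))   -- "\n".join(lines).rstrip("\n")

-- ===== PORT B =====

-- line.strip() == "" as B writes it
def pvIsBlank (line : List Char) : Bool := PySem.Chars.strip line == []

-- _deep_scan: both child levels fixed — accept blanks and lines with first ≤ indent ≤ second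
def pvDeepScan (first second : Nat) : List (List Char) → List (List Char)
  | [] => []
  | line :: rest =>
    if pvIsBlank line then line :: pvDeepScan first second rest
    else if pvIndentOf line < first ∨ second < pvIndentOf line then []
    else line :: pvDeepScan first second rest

-- _level_scan: only the first level fixed — blanks and indent = first pass; the first deeper
-- line fixes the second level and hands over to _deep_scan on the remaining slice
def pvLevelScan (first : Nat) : List (List Char) → List (List Char)
  | [] => []
  | line :: rest =>
    if pvIsBlank line then line :: pvLevelScan first rest
    else if pvIndentOf line < first then []
    else if pvIndentOf line = first then line :: pvLevelScan first rest
    else line :: pvDeepScan first (pvIndentOf line) rest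

-- _child_block: leading blanks (the while loop counting i), then the head line decides
def pvChildBlock (following : List (List Char)) (base : Nat) : List (List Char) :=
  let blanks := following.takeWhile (fun l => pvIsBlank l)
  match following.dropWhile (fun l => pvIsBlank l) with
  | [] => blanks
  | head :: rest =>
    if pvIndentOf head ≤ base then blanks
    else blanks ++ head :: pvLevelScan (pvIndentOf head) rest

def extract_line_with_children_py_alt (text : String) (start : Int) (end_ : Int) : String :=
  let cs := text.toList
  let line_start : Nat := (PySem.Chars.rfindFrom cs ['\n'] 0 (some start) + 1).toNat
  let f := PySem.Chars.findFrom cs ['\n'] end_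
  let line_end : Nat := if f = -1 then cs.length else f.toNat
  let current_line := PySem.Chars.rstrip ((cs.drop line_start).take (line_end - line_start))
  let base_indent := pvIndentOf current_line
  -- text[line_end+1:].split("\n")
  let lines := current_line :: pvChildBlock (PySem.Chars.splitOn (cs.drop (line_end + 1)) ['\n']) base_indent
  let lines := if 0 < base_indent then lines.map (pvStripLeadingSpaces · base_indent) else lines
  String.ofList (pvRstripNl (PySem.Chars.join ['\n'] lines))

-- ===== PRECONDITION & SPEC =====
def Spec_extract_line_with_children_py (text : String) (start : Int) (end_ : Int) (out : String) : Prop := out = extract_line_with_children_py_alt text start end_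
instance (text : String) (start : Int) (end_ : Int) (out : String) : Decidable (Spec_extract_line_with_children_py text start end_ out) := by unfold Spec_extract_line_with_children_py; infer_instance

-- ===== CLAIM (what is proved, stated in full; the proofs are below) =====
def Claim_equal_extract_line_with_children_py : Prop := ∀ (text : String) (start : Int) (end_ : Int), Dom_extract_line_with_children_py text start end_ → Spec_extract_line_with_children_py text start end_ (extract_line_with_children_py text start end_)

-- ===== LEMMAS AND PROOFS =====

-- proof-side restatement of A's loop on a pre-split line list (same state, same branches)
def pvScanA (base : Nat) : List (List Char) → Option Nat → Option Nat → List (List Char)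
  | [], _, _ => []
  | line :: rest, first, second =>
    if PySem.Chars.strip line = [] then line :: pvScanA base rest first second
    else
      let indent := pvIndentOf line
      if indent ≤ base then []
      else if first ≠ none ∧ indent < first.getD 0 then []
      else
        let first' := if first = none then indent else first.getD 0
        let second' := if first' < indent ∧ second = none then some indent else second
        if second' ≠ none ∧ second'.getD 0 < indent then []
        else line :: pvScanA base rest (some first') second'

-- the lines A's scan visits: maximal '\n'-free chunks, no trailing piece after a final '\n'
def pvLines : List Char → List (List Char)
  | [] => []
  | s@(_ :: _) =>
    let w := s.takeWhile (· != '\n')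
    w :: pvLines (s.drop (w.length + 1))
  termination_by s => s.length
  decreasing_by simp_all

lemma pvSplitDecomp (s : List Char) (c : Char) (h : c ∈ s) :
    s = s.takeWhile (· != c) ++ c :: (s.dropWhile (· != c)).tail := by
  have hdw : s.dropWhile (· != c) ≠ [] := by
    intro hnil
    have htw : s.takeWhile (· != c) = s := by
      have hh := List.takeWhile_append_dropWhile (p := (· != c)) (l := s)
      rw [hnil] at hh; simpa using hh
    have := List.mem_takeWhile_imp (htw ▸ h)
    simp at this
  have hhead : (s.dropWhile (· != c)).head hdw = c := by
    have := List.head_dropWhile_not (p := (· != c)) (l := s) hdw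
    simpa using this
  have hct := List.cons_head_tail hdw
  rw [hhead] at hct
  conv_lhs => rw [← List.takeWhile_append_dropWhile (p := (· != c)) (l := s)]
  conv_lhs => rw [← hct]

lemma pvDropAfter (w r : List Char) (c : Char) :
    (w ++ c :: r).drop (w.length + 1) = r := by
  simp [List.drop_append]

lemma pvDropSucc (s : List Char) (c : Char) (h : c ∈ s) :
    s.drop ((s.takeWhile (· != c)).length + 1) = (s.dropWhile (· != c)).tail := by
  set w := s.takeWhile (· != c) with hw
  set r := (s.dropWhile (· != c)).tail with hr
  have hsplit := pvSplitDecomp s c h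
  conv_lhs => rw [hsplit]
  exact pvDropAfter w r c

lemma pvLines_cons_of_mem (s : List Char) (h : '\n' ∈ s) :
    pvLines s = s.takeWhile (· != '\n') :: pvLines ((s.dropWhile (· != '\n')).tail) := by
  have hne : s ≠ [] := by rintro rfl; simp at h
  obtain ⟨a, t, rfl⟩ := List.exists_cons_of_ne_nil hne
  rw [pvLines]
  set w := (a :: t).takeWhile (· != '\n') with hw
  set r := ((a :: t).dropWhile (· != '\n')).tail with hrr
  congr 1
  have hdr := pvDropSucc (a :: t) '\n' h
  rw [hdr]

lemma pvLines_of_not_mem (s : List Char) (hne : s ≠ []) (h : '\n' ∉ s) :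
    pvLines s = [s] := by
  obtain ⟨a, t, rfl⟩ := List.exists_cons_of_ne_nil hne
  rw [pvLines]
  have htw : (a :: t).takeWhile (· != '\n') = a :: t :=
    List.takeWhile_eq_self_iff.mpr (by
      intro x hx
      simp only [bne_iff_ne, ne_eq]
      intro hh; exact h (hh ▸ hx))
  simp only [htw]
  rw [List.drop_of_length_le (by simp), pvLines]

lemma pvGoSingle (c : Char) : ∀ (fuel : Nat) (l : List Char), l.length ≤ fuel → ∀ cur acc,
    PySem.Chars.splitOn.go [c] fuel l cur acc
      = acc.reverse ++ (List.splitOnP (· == c) l).modifyHead (cur.reverse ++ ·) := by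
  intro fuel
  induction fuel with
  | zero =>
    intro l hl cur acc
    have : l = [] := List.length_eq_zero_iff.mp (Nat.le_zero.mp hl)
    subst this
    simp [PySem.Chars.splitOn.go, List.splitOnP_nil]
  | succ f ih =>
    intro l hl cur acc
    cases l with
    | nil => simp [PySem.Chars.splitOn.go, List.splitOnP_nil]
    | cons a rest =>
      simp only [PySem.Chars.splitOn.go]
      by_cases hc : c = a
      · subst hc
        have hpref : [c].isPrefixOf (c :: rest) = true := by simp [List.isPrefixOf]
        rw [if_pos hpref]
        rw [ih _ (by simpa using Nat.le_of_succ_le_succ hl) [] (cur.reverse :: acc)]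
        simp [List.splitOnP_cons]
        exact congrFun List.modifyHead_id _
      · have hpref : [c].isPrefixOf (a :: rest) = false := by
          simp [List.isPrefixOf]; exact fun h => (hc h).elim
        rw [if_neg (by simp [hpref])]
        rw [ih _ (by simpa using Nat.le_of_succ_le_succ hl) (a :: cur) acc]
        have : (a == c) = false := by simp [beq_eq_false_iff_ne]; exact fun h => hc h.symm
        simp [List.splitOnP_cons, this, List.modifyHead_modifyHead, Function.comp_def]

lemma pvSplitOnSingle (s : List Char) (c : Char) :
    PySem.Chars.splitOn s [c] = List.splitOnP (· == c) s := by
  unfold PySem.Chars.splitOn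
  rw [pvGoSingle c (s.length+1) s (Nat.le_succ _) [] []]
  simp
  exact congrFun List.modifyHead_id _

-- split("\n") is pvLines, possibly with a trailing "" piece (after a final '\n', or s = "")
lemma pvSplitCases : ∀ (n : Nat) (s : List Char), s.length ≤ n →
    List.splitOnP (· == '\n') s = pvLines s ∨
      List.splitOnP (· == '\n') s = pvLines s ++ [[]] := by
  intro n
  induction n with
  | zero =>
    intro s hs
    have : s = [] := List.length_eq_zero_iff.mp (Nat.le_zero.mp hs)
    subst this
    right; simp [List.splitOnP_nil, pvLines]
  | succ m ih =>
    intro s hs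
    rcases eq_or_ne s [] with rfl | hne
    · right; simp [List.splitOnP_nil, pvLines]
    by_cases hmem : '\n' ∈ s
    · have hw : ∀ x ∈ s.takeWhile (· != '\n'), ¬ ((x == '\n') = true) := by
        intro x hx
        have := List.mem_takeWhile_imp hx
        simpa using this
      set r := (s.dropWhile (· != '\n')).tail with hr
      have hsp : List.splitOnP (· == '\n') s
          = s.takeWhile (· != '\n') :: List.splitOnP (· == '\n') r := by
        conv_lhs => rw [pvSplitDecomp s '\n' hmem]
        exact List.splitOnP_first _ _ hw '\n' (by simp) r
      have hrlen : r.length ≤ m := by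
        have h1 : (s.dropWhile (· != '\n')).length ≤ s.length := List.length_dropWhile_le _ _
        have h2 : r.length < s.length ∨ r.length + 1 = (s.dropWhile (· != '\n')).length := by
          rcases hdd : s.dropWhile (· != '\n') with _ | ⟨d, rr⟩
          · left; rw [hr, hdd]; simp [List.length_pos_of_ne_nil hne]
          · right; rw [hr, hdd]; simp
        rcases h2 with h2 | h2
        · omega
        · omega
      rw [hsp, pvLines_cons_of_mem s hmem, ← hr]
      rcases ih r hrlen with h | h
      · left; rw [h]
      · right; rw [h]; simp
    · left
      have hall : ∀ x ∈ s, ¬ ((x == '\n') = true) := by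
        intro x hx hh
        have hxe : x = '\n' := by simpa using hh
        exact hmem (hxe ▸ hx)
      rw [List.splitOnP_eq_single _ _ hall, pvLines_of_not_mem s hne hmem]

lemma pvRstripNl_no_nl (s : List Char) (h : '\n' ∉ s) : pvRstripNl s = s := by
  unfold pvRstripNl
  rw [List.dropWhile_eq_self_iff.mpr, List.reverse_reverse]
  intro hl hp
  have : s.reverse[0] ∈ s := List.mem_reverse.mp (List.getElem_mem hl)
  exact h ((beq_iff_eq.mp hp) ▸ this)

lemma pvSingletonPrefix_iff (s : List Char) (c : Char) (i : Nat) :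
    [c] <+: s.drop i ↔ s[i]? = some c := by
  constructor
  · rintro ⟨t, ht⟩
    have : (s.drop i)[0]? = some c := by rw [← ht]; simp
    rwa [List.getElem?_drop, Nat.add_zero] at this
  · intro hi
    have hlt0 : 0 < (s.drop i).length := by
      have := (List.getElem?_eq_some_iff.mp hi).1
      simp; omega
    have hne : s.drop i ≠ [] := List.ne_nil_of_length_pos hlt0
    have hg : (s.drop i)[0]'hlt0 = c := by
      have h0 : (s.drop i)[0]? = some c := by rw [List.getElem?_drop, Nat.add_zero]; exact hi
      rw [List.getElem?_eq_getElem hlt0] at h0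
      exact Option.some.inj h0
    refine ⟨(s.drop i).tail, ?_⟩
    calc [c] ++ (s.drop i).tail = c :: (s.drop i).tail := rfl
      _ = (s.drop i).head hne :: (s.drop i).tail := by rw [List.head_eq_getElem, hg]
      _ = s.drop i := List.cons_head_tail hne

lemma pvFindSingle_neg (s : List Char) (c : Char) (h : c ∉ s) :
    PySem.Chars.find s [c] = -1 := by
  rw [PySem.Chars.find_eq_neg_one_iff]
  intro hinf
  exact h (List.singleton_sublist.mp hinf.sublist)

lemma pvFindSingle (s : List Char) (c : Char) (h : c ∈ s) :
    PySem.Chars.find s [c] = ((s.takeWhile (· != c)).length : Int) := by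
  have hinf : [c] <:+: s :=
    ⟨s.takeWhile (· != c), (s.dropWhile (· != c)).tail, by
      conv_rhs => rw [pvSplitDecomp s c h]
      simp⟩
  have hnn : 0 ≤ PySem.Chars.find s [c] := (PySem.Chars.find_nonneg_iff s [c]).mpr hinf
  obtain ⟨hpre, hmin⟩ := PySem.Chars.find_spec hnn
  set k := (s.takeWhile (· != c)).length with hk
  set j := (PySem.Chars.find s [c]).toNat with hj
  have hsk : s[k]? = some c := by
    conv_lhs => rw [pvSplitDecomp s c h]
    rw [List.getElem?_append_right (by simp [hk])]
    simp [hk]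
  have hprek : [c] <+: s.drop k := (pvSingletonPrefix_iff s c k).mpr hsk
  have hlt : ∀ i < k, ¬ [c] <+: s.drop i := by
    intro i hik hp
    have hsi := (pvSingletonPrefix_iff s c i).mp hp
    have hiw : i < (s.takeWhile (· != c)).length := hik
    have : s[i]? = (s.takeWhile (· != c))[i]? := by
      conv_lhs => rw [pvSplitDecomp s c h]
      rw [List.getElem?_append_left hiw]
    rw [this] at hsi
    have hmem := List.mem_takeWhile_imp (List.getElem_mem hiw)
    rw [List.getElem?_eq_getElem hiw] at hsi
    have := Option.some.inj hsi
    rw [this] at hmem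
    simp at hmem
  have hjk : j = k := by
    rcases Nat.lt_trichotomy j k with hh | hh | hh
    · exact absurd hpre (hlt j hh)
    · exact hh
    · exact absurd hprek (hmin k hh)
  have : ((PySem.Chars.find s [c]).toNat : Int) = PySem.Chars.find s [c] := Int.toNat_of_nonneg hnn
  rw [← this, ← hj, hjk]

-- the bridge: A's position loop = A's branch structure run on the pre-split lines
lemma pvLoopA_eq (cs : List Char) (base : Nat) :
    ∀ (fuel pos : Nat), cs.length < fuel + pos → ∀ first second acc,
    pvLoopA cs base fuel pos first second acc
      = acc ++ pvScanA base (pvLines (cs.drop pos)) first second := by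
  intro fuel
  induction fuel with
  | zero =>
    intro pos h first second acc
    rw [List.drop_of_length_le (by omega)]
    simp [pvLoopA, pvLines, pvScanA]
  | succ f ih =>
    intro pos h first second acc
    by_cases hpos : pos < cs.length
    case neg =>
      rw [List.drop_of_length_le (by omega)]
      simp only [pvLoopA, if_neg hpos]
      simp [pvLines, pvScanA]
    case pos =>
      set s := cs.drop pos with hs
      have hslen : s.length = cs.length - pos := by rw [hs]; simp
      have hsne : s ≠ [] := by
        intro hnil; rw [hnil] at hslen; simp at hslen; omega
      have hkle : pos ≤ cs.length := by omega
      obtain ⟨w, hwnl, hNext, hLines, hwpre⟩ :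
          ∃ w : List Char, '\n' ∉ w ∧
            (if PySem.Chars.findFrom cs ['\n'] (pos : Int) = -1 then cs.length
              else (PySem.Chars.findFrom cs ['\n'] (pos : Int)).toNat) = pos + w.length ∧
            pvLines s = w :: pvLines (cs.drop (pos + w.length + 1)) ∧
            s.take w.length = w := by
        by_cases hmem : '\n' ∈ s
        · refine ⟨s.takeWhile (· != '\n'), ?_, ?_, ?_, ?_⟩
          · intro hin
            have := List.mem_takeWhile_imp hin; simp at this
          · have hfe : PySem.Chars.findFrom cs ['\n'] (pos : Int)
                = ((pos + (s.takeWhile (· != '\n')).length : Nat) : Int) := by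
              rw [PySem.Chars.findFrom_natCast cs ['\n'] pos hkle, ← hs,
                pvFindSingle s '\n' hmem]
              rw [if_neg (by omega : ¬(((s.takeWhile (· != '\n')).length : Int) = -1))]
              push_cast; ring
            rw [hfe,
              if_neg (by omega : ¬(((pos + (s.takeWhile (· != '\n')).length : Nat) : Int) = -1))]
            omega
          · have hdd : cs.drop (pos + (s.takeWhile (· != '\n')).length + 1)
                = (s.dropWhile (· != '\n')).tail := by
              have h4 : cs.drop (pos + (s.takeWhile (· != '\n')).length + 1)
                  = s.drop ((s.takeWhile (· != '\n')).length + 1) := by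
                rw [hs, List.drop_drop]
                rfl
              rw [h4, pvDropSucc s '\n' hmem]
            rw [pvLines_cons_of_mem s hmem, hdd]
          · exact (List.prefix_iff_eq_take.mp (List.takeWhile_prefix _)).symm
        · refine ⟨s, hmem, ?_, ?_, ?_⟩
          · rw [PySem.Chars.findFrom_natCast cs ['\n'] pos hkle, ← hs,
              pvFindSingle_neg s '\n' hmem, if_pos rfl, if_pos rfl]
            omega
          · rw [pvLines_of_not_mem s hsne hmem]
            rw [List.drop_of_length_le (by omega), pvLines]
          · exact List.take_of_length_le (by omega)
      have hline : pvRstripNl (s.take (pos + w.length - pos)) = w := by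
        rw [Nat.add_sub_cancel_left, hwpre, pvRstripNl_no_nl w hwnl]
      rw [pvLoopA, if_pos hpos]
      simp only [← hs, hNext, hline]
      set pos' := pos + w.length + 1 with hpos'
      rw [hLines]
      have ihh := ih pos' (by omega)
      simp only [pvScanA]
      by_cases hblank : PySem.Chars.strip w = []
      · rw [if_pos hblank, if_pos hblank, ihh]
        simp
      · rw [if_neg hblank, if_neg hblank]
        by_cases hib : pvIndentOf w ≤ base
        · rw [if_pos hib, if_pos hib]; simp
        · rw [if_neg hib, if_neg hib]
          by_cases hfn : first ≠ none ∧ pvIndentOf w < first.getD 0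
          · rw [if_pos hfn, if_pos hfn]; simp
          · rw [if_neg hfn, if_neg hfn]
            by_cases hbrk : (if (if first = none then pvIndentOf w else first.getD 0) < pvIndentOf w
                  ∧ second = none then some (pvIndentOf w) else second) ≠ none ∧
                (if (if first = none then pvIndentOf w else first.getD 0) < pvIndentOf w
                  ∧ second = none then some (pvIndentOf w) else second).getD 0 < pvIndentOf w
            · rw [if_pos hbrk, if_pos hbrk]; simp
            · rw [if_neg hbrk, if_neg hbrk, ihh]; simp

-- A's scan with both registers set is B's _deep_scan
lemma pvScanA_deep (base f sd : Nat) (hf : base < f) :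
    ∀ ls, pvScanA base ls (some f) (some sd) = pvDeepScan f sd ls := by
  intro ls
  induction ls with
  | nil => simp [pvScanA, pvDeepScan]
  | cons line rest ih =>
    by_cases hb : PySem.Chars.strip line = []
    · have hb' : pvIsBlank line = true := by simp [pvIsBlank, hb]
      simp [pvScanA, pvDeepScan, hb, hb', ih]
    · have hb'' : pvIsBlank line = false := by simp [pvIsBlank, hb]
      by_cases h1 : pvIndentOf line ≤ base
      · have hif : pvIndentOf line < f := by omega
        simp [pvScanA, pvDeepScan, hb, hb'', h1, hif]
      · by_cases h2 : pvIndentOf line < f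
        · simp [pvScanA, pvDeepScan, hb, hb'', h1, h2]
        · by_cases h3 : sd < pvIndentOf line
          · have hnf : ¬ pvIndentOf line < f := h2
            simp [pvScanA, pvDeepScan, hb, hb'', h1, h2, h3]
          · simp [pvScanA, pvDeepScan, hb, hb'', h1, h2, h3, ih]

-- A's scan with only the first register set is B's _level_scan
lemma pvScanA_level (base f : Nat) (hf : base < f) :
    ∀ ls, pvScanA base ls (some f) none = pvLevelScan f ls := by
  intro ls
  induction ls with
  | nil => simp [pvScanA, pvLevelScan]
  | cons line rest ih =>
    by_cases hb : PySem.Chars.strip line = []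
    · have hb' : pvIsBlank line = true := by simp [pvIsBlank, hb]
      simp [pvScanA, pvLevelScan, hb, hb', ih]
    · have hb'' : pvIsBlank line = false := by simp [pvIsBlank, hb]
      by_cases h1 : pvIndentOf line ≤ base
      · have hif : pvIndentOf line < f := by omega
        simp [pvScanA, pvLevelScan, hb, hb'', h1, hif]
      · by_cases h2 : pvIndentOf line < f
        · simp [pvScanA, pvLevelScan, hb, hb'', h1, h2]
        · by_cases h3 : pvIndentOf line = f
          · have hnf : ¬ f < pvIndentOf line := by omega
            simp [pvScanA, pvLevelScan, hb, hb'', h3, hf, ih]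
          · have hlt : f < pvIndentOf line := by omega
            have hdeep := pvScanA_deep base f (pvIndentOf line) hf rest
            simp [pvScanA, pvLevelScan, hb, hb'', h1, h2, h3, hlt, hdeep]

-- on a blank head line _child_block just passes the line through
lemma pvChildBlock_cons_blank (line : List Char) (rest : List (List Char)) (base : Nat)
    (hbb : pvIsBlank line = true) :
    pvChildBlock (line :: rest) base = line :: pvChildBlock rest base := by
  rcases hdd : rest.dropWhile (fun l => pvIsBlank l) with _ | ⟨head, r⟩
  · simp [pvChildBlock, hbb, hdd]
  · by_cases hib : pvIndentOf head ≤ base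
    · simp [pvChildBlock, hbb, hdd, hib]
    · simp [pvChildBlock, hbb, hdd, hib]

-- on a non-blank head line _child_block is the head test plus _level_scan
lemma pvChildBlock_cons_nonblank (line : List Char) (rest : List (List Char)) (base : Nat)
    (hbb : pvIsBlank line = false) :
    pvChildBlock (line :: rest) base
      = if pvIndentOf line ≤ base then []
        else line :: pvLevelScan (pvIndentOf line) rest := by
  simp only [pvChildBlock, List.takeWhile_cons, List.dropWhile_cons, hbb]
  simp

-- A's scan from the empty state is B's _child_block
lemma pvScanA_eq_childBlock (base : Nat) :
    ∀ ls, pvScanA base ls none none = pvChildBlock ls base := by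
  intro ls
  induction ls with
  | nil => simp [pvScanA, pvChildBlock]
  | cons line rest ih =>
    by_cases hb : PySem.Chars.strip line = []
    · rw [pvChildBlock_cons_blank line rest base (by simp [pvIsBlank, hb])]
      simp [pvScanA, hb, ih]
    · rw [pvChildBlock_cons_nonblank line rest base (by simp [pvIsBlank, hb])]
      by_cases h1 : pvIndentOf line ≤ base
      · simp [pvScanA, hb, h1]
      · have hlevel := pvScanA_level base (pvIndentOf line) (by omega) rest
        have hnlt : ¬ pvIndentOf line < pvIndentOf line := by omega
        simp [pvScanA, hb, h1, hlevel]

-- the trailing "" piece of split("\n"): each phase either keeps it at the end or broke before it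
lemma pvDeep_concat_nil (f sd : Nat) : ∀ ls,
    pvDeepScan f sd (ls ++ [[]]) = pvDeepScan f sd ls ++ [[]] ∨
      pvDeepScan f sd (ls ++ [[]]) = pvDeepScan f sd ls := by
  intro ls
  induction ls with
  | nil => left; simp [pvDeepScan, show pvIsBlank ([] : List Char) = true from by decide]
  | cons line rest ih =>
    simp only [List.cons_append, pvDeepScan]
    by_cases hb : pvIsBlank line = true
    · rcases ih with h | h
      · left; simp [hb, h]
      · right; simp [hb, h]
    · by_cases h1 : pvIndentOf line < f ∨ sd < pvIndentOf line
      · right; simp [hb, h1]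
      · rcases ih with h | h
        · left; simp [hb, h1, h]
        · right; simp [hb, h1, h]

lemma pvLevel_concat_nil (f : Nat) : ∀ ls,
    pvLevelScan f (ls ++ [[]]) = pvLevelScan f ls ++ [[]] ∨
      pvLevelScan f (ls ++ [[]]) = pvLevelScan f ls := by
  intro ls
  induction ls with
  | nil => left; simp [pvLevelScan, show pvIsBlank ([] : List Char) = true from by decide]
  | cons line rest ih =>
    simp only [List.cons_append, pvLevelScan]
    by_cases hb : pvIsBlank line = true
    · rcases ih with h | h
      · left; simp [hb, h]
      · right; simp [hb, h]
    · by_cases h1 : pvIndentOf line < f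
      · right; simp [hb, h1]
      · by_cases h2 : pvIndentOf line = f
        · rcases ih with h | h
          · left; simp [hb, h2, h]
          · right; simp [hb, h2, h]
        · rcases pvDeep_concat_nil f (pvIndentOf line) rest with h | h
          · left; simp [hb, h1, h2, h]
          · right; simp [hb, h1, h2, h]

lemma pvChildBlock_concat_nil (base : Nat) (ls : List (List Char)) :
    pvChildBlock (ls ++ [[]]) base = pvChildBlock ls base ++ [[]] ∨
      pvChildBlock (ls ++ [[]]) base = pvChildBlock ls base := by
  have hblank : pvIsBlank ([] : List Char) = true := by decide
  rcases hdd : ls.dropWhile (fun l => pvIsBlank l) with _ | ⟨head, r⟩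
  · left
    have htw : ls.takeWhile (fun l => pvIsBlank l) = ls := by
      have h := List.takeWhile_append_dropWhile (p := fun l => pvIsBlank l) (l := ls)
      rw [hdd] at h; simpa using h
    have hdd2 : (ls ++ [[]]).dropWhile (fun l => pvIsBlank l) = [] := by
      rw [List.dropWhile_append, hdd]
      simp [hblank]
    have htw2 : (ls ++ [[]]).takeWhile (fun l => pvIsBlank l) = ls ++ [[]] := by
      rw [List.takeWhile_append, htw]
      simp [hblank]
    simp only [pvChildBlock, hdd, hdd2, htw, htw2]
  · have htwne : ls.takeWhile (fun l => pvIsBlank l) ≠ ls := by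
      intro he
      have h := List.takeWhile_append_dropWhile (p := fun l => pvIsBlank l) (l := ls)
      rw [he, hdd] at h
      have := congrArg List.length h
      simp at this
    have hlen : (ls.takeWhile (fun l => pvIsBlank l)).length ≠ ls.length := by
      intro he
      exact htwne ((List.takeWhile_prefix _).eq_of_length he)
    have hdd2 : (ls ++ [[]]).dropWhile (fun l => pvIsBlank l) = head :: (r ++ [[]]) := by
      rw [List.dropWhile_append, hdd]; simp
    have htw2 : (ls ++ [[]]).takeWhile (fun l => pvIsBlank l) = ls.takeWhile (fun l => pvIsBlank l) := by
      rw [List.takeWhile_append, if_neg hlen]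
    simp only [pvChildBlock, hdd, hdd2, htw2]
    by_cases hib : pvIndentOf head ≤ base
    · right; rw [if_pos hib, if_pos hib]
    · rw [if_neg hib, if_neg hib]
      rcases pvLevel_concat_nil (pvIndentOf head) r with h | h
      · left; rw [h]; simp
      · right; rw [h]

-- "\n".join on a list with a trailing "" adds a trailing '\n'
lemma pvJoin_concat_nil (c : List Char) : ∀ X,
    PySem.Chars.join ['\n'] ((c :: X) ++ [[]]) = PySem.Chars.join ['\n'] (c :: X) ++ ['\n'] := by
  intro X
  induction X generalizing c with
  | nil => rw [List.cons_append, List.nil_append, PySem.Chars.join_cons_cons,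
      PySem.Chars.join_singleton, PySem.Chars.join_singleton]; simp
  | cons x xs ih =>
    rw [List.cons_append, List.cons_append, PySem.Chars.join_cons_cons, ← List.cons_append, ih x,
      PySem.Chars.join_cons_cons]
    simp

lemma pvRstripNl_concat_nl (z : List Char) : pvRstripNl (z ++ ['\n']) = pvRstripNl z := by
  unfold pvRstripNl
  simp

-- stripping up-to-base leading spaces keeps the trailing "" piece a "" piece
lemma pvStrip_nil (base : Nat) : pvStripLeadingSpaces [] base = [] := by
  simp [pvStripLeadingSpaces]

-- assembling the block from children X ++ [""] gives the same string as from X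
lemma pvAssemble (cur : List Char) (base : Nat) (X : List (List Char)) :
    pvRstripNl (PySem.Chars.join ['\n']
      (if 0 < base then (cur :: (X ++ [[]])).map (pvStripLeadingSpaces · base) else cur :: (X ++ [[]])))
    = pvRstripNl (PySem.Chars.join ['\n']
      (if 0 < base then (cur :: X).map (pvStripLeadingSpaces · base) else cur :: X)) := by
  by_cases hb : 0 < base
  · rw [if_pos hb, if_pos hb]
    have hm : (cur :: (X ++ [[]])).map (pvStripLeadingSpaces · base)
        = (pvStripLeadingSpaces cur base :: X.map (pvStripLeadingSpaces · base)) ++ [[]] := by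
      simp [pvStrip_nil]
    rw [hm]
    rw [pvJoin_concat_nil, pvRstripNl_concat_nl]
    simp
  · rw [if_neg hb, if_neg hb, ← List.cons_append, pvJoin_concat_nil, pvRstripNl_concat_nl]

-- ===== VERDICT (by name: the statement is the Claim_ definition above) =====
theorem extract_line_with_children_py_spec : Claim_equal_extract_line_with_children_py := by
  intro text start end_ _
  unfold Spec_extract_line_with_children_py
  unfold extract_line_with_children_py extract_line_with_children_py_alt
  simp only []
  set cs := text.toList with hcs
  set f := PySem.Chars.findFrom cs ['\n'] end_ with hf
  set line_end : Nat := if f = -1 then cs.length else f.toNat with hle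
  set cur := PySem.Chars.rstrip ((cs.drop ((PySem.Chars.rfindFrom cs ['\n'] 0 (some start) + 1).toNat)).take (line_end - (PySem.Chars.rfindFrom cs ['\n'] 0 (some start) + 1).toNat)) with hcur
  set base := pvIndentOf cur with hbase
  have hA : pvLoopA cs base cs.length (line_end + 1) none none []
      = pvChildBlock (pvLines (cs.drop (line_end + 1))) base := by
    rw [pvLoopA_eq cs base cs.length (line_end + 1) (by omega) none none []]
    rw [pvScanA_eq_childBlock]
    simp
  rw [hA, pvSplitOnSingle]
  rcases pvSplitCases (cs.drop (line_end + 1)).length (cs.drop (line_end + 1)) le_rfl with h | h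
  · rw [h]
  · rw [h]
    rcases pvChildBlock_concat_nil base (pvLines (cs.drop (line_end + 1))) with hcb | hcb
    · rw [hcb, ← List.cons_append]
      exact congrArg String.ofList (pvAssemble cur base (pvChildBlock (pvLines (cs.drop (line_end + 1))) base)).symm
    · rw [hcb]
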